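-- pv_equiv track=rewrite | github.com/aysieelf/Alpha63 | Week_2/2_Git/dict_functions.py | aggregate_min
-- ===== SOURCE A (Python) =====
-- def aggregate_min(data):
--     """
--     Aggregates a list of 2-tuples into a dictionary.
--
--     Parameters:
--         data (list) - the list of 2 tuples
--
--     Returns:
--         (dict) - the aggregated dictionary
--     """
--     result = {}
--
--     for key, value in data:
--         if key in result:
--             result[key] = min(result[key], value)
--         else:
--             result[key] = value
--
--     return result
-- ===== SOURCE B (Python) =====
-- def aggregate_min(data):
--     groups = {}
--     for key, value in data:
--         groups.setdefault(key, []).append(value)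
--     return {k: min(v) for k, v in groups.items()}
-- ===== Notes on version B (the rewrite author's own statement) =====
-- stated objective: alternative
-- what changed: B replaces A's running-minimum dict update with a two-pass scheme: first group all values per key into lists (setdefault/append), then take min of each list in a dict comprehension.
import Mathlib
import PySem

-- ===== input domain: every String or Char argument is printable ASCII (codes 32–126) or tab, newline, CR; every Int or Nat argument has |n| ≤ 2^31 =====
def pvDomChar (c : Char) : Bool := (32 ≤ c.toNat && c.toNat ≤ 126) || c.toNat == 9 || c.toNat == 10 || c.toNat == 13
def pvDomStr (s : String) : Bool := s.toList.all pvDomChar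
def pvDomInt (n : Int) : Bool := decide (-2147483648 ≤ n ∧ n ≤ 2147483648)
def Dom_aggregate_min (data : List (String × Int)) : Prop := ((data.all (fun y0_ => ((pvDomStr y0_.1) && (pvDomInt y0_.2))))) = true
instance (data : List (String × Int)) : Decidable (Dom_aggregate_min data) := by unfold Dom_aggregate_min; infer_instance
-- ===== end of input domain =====

-- B groups all values per key into lists first, then takes the minimum of each list; same result, different decomposition.

-- ===== PORT A =====
def aggregate_min (data : List (String × Int)) : List (String × Int) :=
  (data.foldl (fun result kv =>
      if result.contains kv.1 then
        result.insert kv.1 (min (result.getD kv.1 0) kv.2)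
      else
        result.insert kv.1 kv.2)
    PySem.Dict.empty).items

-- ===== PORT B =====
-- groups.setdefault(key, []).append(value) is Dict.modify key [] (· ++ [value]);
-- min(v) is PySem.List.min? with identity key — every grouped list is nonempty, so getD 0 is never the default.
def aggregate_min_alt (data : List (String × Int)) : List (String × Int) :=
  let groups := data.foldl (fun d kv => d.modify kv.1 [] (fun vs => vs ++ [kv.2])) PySem.Dict.empty
  groups.items.map (fun p => (p.1, (PySem.List.min? p.2 (fun y => y)).getD 0))

-- ===== PRECONDITION & SPEC =====
def Spec_aggregate_min (data : List (String × Int)) (out : List (String × Int)) : Prop := out = aggregate_min_alt data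
instance (data : List (String × Int)) (out : List (String × Int)) : Decidable (Spec_aggregate_min data out) := by unfold Spec_aggregate_min; infer_instance

-- ===== CLAIM (what is proved, stated in full; the proofs are below) =====
def Claim_equal_aggregate_min : Prop := ∀ (data : List (String × Int)), Dom_aggregate_min data → Spec_aggregate_min data (aggregate_min data)

-- ===== LEMMAS AND PROOFS =====

-- A's step written as a single insert, to expose the keys-evolution shape.
lemma stepA_eq_insert (d : PySem.Dict String Int) (kv : String × Int) :
    (if d.contains kv.1 then d.insert kv.1 (min (d.getD kv.1 0) kv.2) else d.insert kv.1 kv.2)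
      = d.insert kv.1 (if d.contains kv.1 then min (d.getD kv.1 0) kv.2 else kv.2) := by
  by_cases h : d.contains kv.1 = true <;> simp [h]

-- folding Python's pairwise min over an option accumulator
lemma optmin_fold (vs : List Int) (m : Int) :
    vs.foldl (fun o v => some (match o with | none => v | some m => min m v)) (some m)
      = some (vs.foldl min m) := by
  induction vs generalizing m with
  | nil => rfl
  | cons v rest ih => simpa using ih (min m v)

-- characterisation of A's running dict at one key
lemma A_get? (l : List (String × Int)) (d : PySem.Dict String Int) (k : String) :
    (l.foldl (fun result kv =>
        if result.contains kv.1 then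
          result.insert kv.1 (min (result.getD kv.1 0) kv.2)
        else
          result.insert kv.1 kv.2) d).get? k
      = ((l.filter (fun p => p.1 == k)).map (·.2)).foldl
          (fun o v => some (match o with | none => v | some m => min m v)) (d.get? k) := by
  induction l generalizing d with
  | nil => rfl
  | cons kv rest ih =>
    simp only [List.foldl_cons, ih, List.filter_cons]
    by_cases hk : kv.1 = k
    · subst hk
      simp only [beq_self_eq_true, if_pos, List.map_cons, List.foldl_cons]
      rw [PySem.Dict.contains_eq_isSome_get? d kv.1]
      cases h : d.get? kv.1 with
      | none => simp [PySem.Dict.get?_insert_self]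
      | some m =>
        simp only [Option.isSome_some, if_true, PySem.Dict.get?_insert_self]
        have : d.getD kv.1 0 = m := PySem.Dict.getD_of_get?_eq_some d 0 h
        simp [this]
    · have hb : (kv.1 == k) = false := by simp [hk]
      simp only [hb, Bool.false_eq_true, if_false]
      by_cases hc : d.contains kv.1 = true <;>
        simp [hc, PySem.Dict.get?_insert_of_ne _ _ (Ne.symm hk)]

-- ===== VERDICT (by name: the statement is the Claim_ definition above) =====
theorem aggregate_min_spec : Claim_equal_aggregate_min := by
  intro data _
  unfold Spec_aggregate_min aggregate_min aggregate_min_alt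
  simp only []
  set stepA := fun (result : PySem.Dict String Int) (kv : String × Int) =>
    if result.contains kv.1 then
      result.insert kv.1 (min (result.getD kv.1 0) kv.2)
    else
      result.insert kv.1 kv.2 with hstepA
  set stepB := fun (d : PySem.Dict String (List Int)) (kv : String × Int) =>
    d.modify kv.1 [] (fun vs => vs ++ [kv.2]) with hstepB
  have hA' : stepA = fun (d : PySem.Dict String Int) (kv : String × Int) =>
      d.insert kv.1 (if d.contains kv.1 then min (d.getD kv.1 0) kv.2 else kv.2) := by
    funext d kv; exact stepA_eq_insert d kv
  have hkA : (data.foldl stepA PySem.Dict.empty).keys = PySem.Set.ofList (data.map (·.1)) := by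
    rw [hA', PySem.Dict.keys_foldl_insert_key, PySem.Dict.keys_empty, PySem.Set.update_nil_left]
  have hkB : (data.foldl stepB PySem.Dict.empty).keys = PySem.Set.ofList (data.map (·.1)) := by
    rw [hstepB, PySem.Dict.keys_foldl_modify_key, PySem.Dict.keys_empty, PySem.Set.update_nil_left]
  have ndA : (data.foldl stepA PySem.Dict.empty).keys.Nodup := by
    rw [hkA]; exact PySem.Set.nodup_ofList _
  have ndB : (data.foldl stepB PySem.Dict.empty).keys.Nodup := by
    rw [hkB]; exact PySem.Set.nodup_ofList _
  rw [PySem.Dict.items_eq_map_keys _ ndA 0, PySem.Dict.items_eq_map_keys _ ndB []]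
  rw [List.map_map, hkA, hkB]
  apply List.map_congr_left
  intro k hkmem
  have hkd : k ∈ data.map (·.1) := (PySem.Set.mem_ofList _ _).1 hkmem
  -- the grouped value list at k
  have hgB : (data.foldl stepB PySem.Dict.empty).getD k []
      = (data.filter (fun p => p.1 == k)).map (·.2) := by
    rw [hstepB]
    have := PySem.Dict.getD_foldl_modify_append (l := data) (d := PySem.Dict.empty) (c := k)
    simpa [PySem.Dict.getD_empty] using this
  obtain ⟨p, hp, hpk⟩ := List.mem_map.1 hkd
  have hne : (data.filter (fun p => p.1 == k)).map (·.2) ≠ [] := by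
    have : p ∈ data.filter (fun p => p.1 == k) := by
      rw [List.mem_filter]; exact ⟨hp, by simp [hpk]⟩
    intro h
    simp only [List.map_eq_nil_iff] at h
    rw [h] at this; exact (List.not_mem_nil) this
  cases hvs : (data.filter (fun p => p.1 == k)).map (·.2) with
  | nil => exact absurd hvs hne
  | cons v rest =>
    have hAg : (data.foldl stepA PySem.Dict.empty).getD k 0 = rest.foldl min v := by
      rw [PySem.Dict.getD_eq_get?_getD, A_get? data PySem.Dict.empty k, hvs]
      simp [PySem.Dict.get?_empty, optmin_fold]
    simp only [Function.comp, hgB, hvs, hAg, PySem.List.min?_id_cons, Option.getD_some]
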